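-- pv_equiv track=rewrite | github.com/bauwenst/TkTkT | src/tktkt/evaluation/morphological.py | compareSplits_cursors
-- ===== SOURCE A (Python) =====
-- def compareSplits_cursors(candidate: str, reference: str):
--     """
--     Takes two words split with spaces and computes the factors of the precision and recall of those splits.
--     For example,
--         candidate a bc d ef
--         reference a b cd e f
--     has precision 66% and recall 75%.
--
--     Assumes they have the same amount of non-spaces.
--     """
--
--     candidate_index = 0
--     reference_index = 0
--
--     tp        = 0
--     relevant  = 0
--     predicted = 0
--     total     = 0
--     while candidate_index < len(candidate) and reference_index < len(reference):
--         candidate_split = candidate[candidate_index] == " "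
--         reference_split = reference[reference_index] == " "
--
--         tp += candidate_split and reference_split
--         relevant  += reference_split
--         predicted += candidate_split
--         total += 1
--
--         candidate_index += 1 + candidate_split
--         reference_index += 1 + reference_split
--
--     return tp, predicted, relevant, total - 1  # The `total` variable counts the amount of characters, not splits.
-- ===== SOURCE B (Python) =====
-- def _space_flags(s: str):
--     # Independent pass: record, for each cursor stop, whether it is a space,
--     # advancing by 2 past a space (skipping the char after it) and by 1 otherwise.
--     flags = []
--     i = 0
--     n = len(s)
--     while i < n:
--         is_space = s[i] == " "
--         flags.append(is_space)
--         i += 2 if is_space else 1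
--     return flags
--
-- def compareSplits_cursors(candidate: str, reference: str):
--     tp = predicted = relevant = total = 0
--     for c, r in zip(_space_flags(candidate), _space_flags(reference)):
--         tp += c and r
--         predicted += c
--         relevant += r
--         total += 1
--     return tp, predicted, relevant, total - 1
-- ===== Notes on version B (the rewrite author's own statement) =====
-- stated objective: alternative
-- what changed: Replaced A's single synchronized two-cursor loop with two independent flag-extraction passes (one per string, same skip-past-space advance) combined by a zip that truncates to the shorter flag sequence.
import Mathlib
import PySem

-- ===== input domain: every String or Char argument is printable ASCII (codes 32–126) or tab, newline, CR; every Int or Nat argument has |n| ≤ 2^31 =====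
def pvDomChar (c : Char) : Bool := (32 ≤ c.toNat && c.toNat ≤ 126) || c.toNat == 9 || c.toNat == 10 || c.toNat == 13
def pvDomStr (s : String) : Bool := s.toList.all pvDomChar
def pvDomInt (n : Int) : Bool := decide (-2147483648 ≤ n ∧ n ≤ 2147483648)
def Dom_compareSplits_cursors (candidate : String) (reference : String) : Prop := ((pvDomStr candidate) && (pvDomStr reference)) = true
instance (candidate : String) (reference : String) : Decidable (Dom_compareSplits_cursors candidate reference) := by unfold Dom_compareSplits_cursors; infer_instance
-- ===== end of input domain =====

-- B replaces A's single synchronized two-cursor loop by two independent flag-extraction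
-- passes combined with a truncating zip (objective: alternative decomposition, same cost).

-- ===== PORT A =====
-- A's while loop over two cursors; the suffix of each string from its cursor is the state
-- (ci < len ↔ suffix ≠ []; ci += 1 + split ↔ drop 1 or 2 from the suffix).
def pvLoopA : List Char → List Char → Int → Int → Int → Int → Int × Int × Int × Int
  | c :: cs, r :: rs, tp, rel, pred, tot =>
      let cspl := c == ' '
      let rspl := r == ' '
      pvLoopA (if cspl then cs.drop 1 else cs) (if rspl then rs.drop 1 else rs)
        (tp + (if cspl && rspl then 1 else 0))
        (rel + (if rspl then 1 else 0))
        (pred + (if cspl then 1 else 0))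
        (tot + 1)
  | _, _, tp, rel, pred, tot => (tp, rel, pred, tot)
  termination_by c _ _ _ _ _ => c.length
  decreasing_by simp; split <;> simp

def compareSplits_cursors (candidate : String) (reference : String) : Int × Int × Int × Int :=
  let s := pvLoopA candidate.toList reference.toList 0 0 0 0
  (s.1, s.2.2.1, s.2.1, s.2.2.2 - 1)

-- ===== PORT B =====
def pvFlags : List Char → List Bool
  | [] => []
  | c :: cs => (c == ' ') :: pvFlags (if c == ' ' then cs.drop 1 else cs)
  termination_by l => l.length
  decreasing_by simp; split <;> simp

def pvStep (s : Int × Int × Int × Int) (p : Bool × Bool) : Int × Int × Int × Int :=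
  (s.1 + (if p.1 && p.2 then 1 else 0),
   s.2.1 + (if p.1 then 1 else 0),
   s.2.2.1 + (if p.2 then 1 else 0),
   s.2.2.2 + 1)

def compareSplits_cursors_alt (candidate : String) (reference : String) : Int × Int × Int × Int :=
  let s := (List.zip (pvFlags candidate.toList) (pvFlags reference.toList)).foldl pvStep (0, 0, 0, 0)
  (s.1, s.2.1, s.2.2.1, s.2.2.2 - 1)

-- ===== PRECONDITION & SPEC =====
def Spec_compareSplits_cursors (candidate : String) (reference : String) (out : Int × Int × Int × Int) : Prop := out = compareSplits_cursors_alt candidate reference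
instance (candidate : String) (reference : String) (out : Int × Int × Int × Int) : Decidable (Spec_compareSplits_cursors candidate reference out) := by unfold Spec_compareSplits_cursors; infer_instance

-- ===== CLAIM (what is proved, stated in full; the proofs are below) =====
def Claim_equal_compareSplits_cursors : Prop := ∀ (candidate : String) (reference : String), Dom_compareSplits_cursors candidate reference → Spec_compareSplits_cursors candidate reference (compareSplits_cursors candidate reference)

-- ===== LEMMAS AND PROOFS =====
theorem pvLoopA_eq_foldl (c r : List Char) (tp rel pred tot : Int) :
    pvLoopA c r tp rel pred tot =
      (let s := (List.zip (pvFlags c) (pvFlags r)).foldl pvStep (tp, pred, rel, tot)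
       (s.1, s.2.2.1, s.2.1, s.2.2.2)) := by
  fun_induction pvLoopA c r tp rel pred tot with
  | case1 c cs r rs tp rel pred tot cspl rspl ih =>
      simp only [pvFlags, List.zip_cons_cons, List.foldl_cons, pvStep, cspl, rspl] at *
      exact ih
  | case2 c r tp rel pred tot h =>
      match c, r with
      | [], _ => simp [pvFlags]
      | _ :: _, [] => simp [pvFlags]
      | c :: cs, r :: rs => exact (h c cs r rs rfl rfl).elim

-- ===== VERDICT (by name: the statement is the Claim_ definition above) =====
theorem compareSplits_cursors_spec : Claim_equal_compareSplits_cursors := by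
  intro candidate reference _
  unfold Spec_compareSplits_cursors compareSplits_cursors compareSplits_cursors_alt
  simp [pvLoopA_eq_foldl]
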